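-- pv_equiv track=rewrite | github.com/aaronm6/pyrandomart | pyrandomart.py | gen_xy_positions
-- ===== SOURCE A (Python) =====
-- def gen_xy_positions(bit_pair_string, dims=(17, 9)):
--     """
--     Takes a list of bit pairs and returns a list of positions in the
--     path.
--     """
--     pairPositions = [(dims[0]//2, dims[1]//2)]
--     for pair in bit_pair_string:
--         dx = -1 if pair[-1] == '0' else 1
--         dy = -1 if pair[0] == '0' else 1
--         newX = pairPositions[-1][0] + dx
--         newX = max(0, newX)
--         newX = min(dims[0]-1, newX)
--         newY = pairPositions[-1][1] + dy
--         newY = max(0, newY)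
--         newY = min(dims[1]-1, newY)
--         pairPositions.append((newX, newY))
--     return pairPositions
-- ===== SOURCE B (Python) =====
-- def gen_xy_positions(bit_pair_string, dims=(17, 9)):
--     """
--     Decomposed into two independent 1-D clamped walks, then zipped:
--     x moves on the last bit of each pair, y on the first bit, and the
--     two axes never interact, so walking them separately and zipping
--     the coordinate lists yields the same path.
--     """
--     def walk1d(start, limit, deltas):
--         cur = start
--         out = [cur]
--         for d in deltas:
--             cur = min(limit - 1, max(0, cur + d))
--             out.append(cur)
--         return out
--
--     xs = walk1d(dims[0] // 2, dims[0],
--                 [-1 if p[-1] == '0' else 1 for p in bit_pair_string])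
--     ys = walk1d(dims[1] // 2, dims[1],
--                 [-1 if p[0] == '0' else 1 for p in bit_pair_string])
--     return list(zip(xs, ys))
-- ===== Notes on version B (the rewrite author's own statement) =====
-- stated objective: alternative
-- what changed: Replaces the single tuple-building walk with two independent 1-D clamped walks (x over the last bits, y over the first bits, each over a precomputed delta list) whose coordinate lists are zipped into the path; correct because the two axes never interact.
import Mathlib
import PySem

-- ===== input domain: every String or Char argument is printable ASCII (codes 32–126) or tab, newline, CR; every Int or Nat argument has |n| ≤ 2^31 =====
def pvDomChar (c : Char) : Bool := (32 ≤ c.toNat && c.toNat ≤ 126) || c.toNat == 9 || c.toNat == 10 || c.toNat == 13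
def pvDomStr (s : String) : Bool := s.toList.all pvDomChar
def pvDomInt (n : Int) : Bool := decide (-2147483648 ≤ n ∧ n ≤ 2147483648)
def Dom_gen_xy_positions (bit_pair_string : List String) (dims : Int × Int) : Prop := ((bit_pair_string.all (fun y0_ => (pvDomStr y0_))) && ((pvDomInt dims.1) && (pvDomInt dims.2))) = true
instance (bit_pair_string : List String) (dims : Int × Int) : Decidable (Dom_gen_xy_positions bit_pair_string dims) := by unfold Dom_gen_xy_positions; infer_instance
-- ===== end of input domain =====

-- B decomposes A's single tuple-walk into two independent 1-D clamped walks
-- (x from the last bit, y from the first bit) over precomputed delta lists,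
-- zipped into the path; an alternative decomposition of the same O(n) task.


-- ===== PORT A =====
-- literal port of A: the fold state is the whole list, the previous position is
-- re-read as pairPositions[-1] (pyGet?; the getD default is never hit under Pre_)
def gen_xy_positions (bit_pair_string : List String) (dims : Int × Int) : List (Int × Int) :=
  bit_pair_string.foldl (fun pairPositions pair =>
    let dx : Int := if PySem.Str.pyGet? pair (-1) == some '0' then -1 else 1
    let dy : Int := if PySem.Str.pyGet? pair 0 == some '0' then -1 else 1
    let last := (PySem.List.pyGet? pairPositions (-1)).getD (0, 0)
    let newX := max 0 (last.1 + dx)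
    let newX := min (dims.1 - 1) newX
    let newY := max 0 (last.2 + dy)
    let newY := min (dims.2 - 1) newY
    pairPositions ++ [(newX, newY)])
    [(PySem.Int.floordiv dims.1 2, PySem.Int.floordiv dims.2 2)]

-- ===== PORT B =====
-- Source B's walk1d: a 1-D clamped walk carrying a single scalar accumulator
def pvWalk1d (limit cur : Int) : List Int → List Int
  | [] => []
  | d :: ds => let n := min (limit - 1) (max 0 (cur + d)); n :: pvWalk1d limit n ds

def gen_xy_positions_alt (bit_pair_string : List String) (dims : Int × Int) : List (Int × Int) :=
  let dxs := bit_pair_string.map (fun p => if PySem.Str.pyGet? p (-1) == some '0' then (-1 : Int) else 1)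
  let dys := bit_pair_string.map (fun p => if PySem.Str.pyGet? p 0 == some '0' then (-1 : Int) else 1)
  let sx := PySem.Int.floordiv dims.1 2
  let sy := PySem.Int.floordiv dims.2 2
  (sx :: pvWalk1d dims.1 sx dxs).zip (sy :: pvWalk1d dims.2 sy dys)

-- ===== PRECONDITION & SPEC =====
-- Pre_ excludes lists containing an empty string, on which Python A (pair[-1]) raises IndexError.
def Pre_gen_xy_positions (bit_pair_string : List String) (dims : Int × Int) : Prop :=
  ∀ s ∈ bit_pair_string, s ≠ ""
instance (bit_pair_string : List String) (dims : Int × Int) : Decidable (Pre_gen_xy_positions bit_pair_string dims) := by unfold Pre_gen_xy_positions; infer_instance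
def pvWitness_gen_xy_positions : List String × (Int × Int) := (["01", "10", "11"], (17, 9))

def Spec_gen_xy_positions (bit_pair_string : List String) (dims : Int × Int) (out : List (Int × Int)) : Prop := out = gen_xy_positions_alt bit_pair_string dims
instance (bit_pair_string : List String) (dims : Int × Int) (out : List (Int × Int)) : Decidable (Spec_gen_xy_positions bit_pair_string dims out) := by unfold Spec_gen_xy_positions; infer_instance

-- ===== CLAIM =====
def Claim_equal_gen_xy_positions : Prop := ∀ (bit_pair_string : List String) (dims : Int × Int), Dom_gen_xy_positions bit_pair_string dims → Pre_gen_xy_positions bit_pair_string dims → Spec_gen_xy_positions bit_pair_string dims (gen_xy_positions bit_pair_string dims)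

-- ===== LEMMAS AND PROOFS =====

-- one step of either program, as a pair
def pvStep2 (dims : Int × Int) (cur : Int × Int) (pair : String) : Int × Int :=
  (min (dims.1 - 1) (max 0 (cur.1 + (if PySem.Str.pyGet? pair (-1) == some '0' then (-1 : Int) else 1))),
   min (dims.2 - 1) (max 0 (cur.2 + (if PySem.Str.pyGet? pair 0 == some '0' then (-1 : Int) else 1))))

-- the 2-D walk (tail of the path) from a current position
def pvWalk2 (dims : Int × Int) (cur : Int × Int) : List String → List (Int × Int)
  | [] => []
  | p :: ps => let n := pvStep2 dims cur p; n :: pvWalk2 dims n ps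

-- A's fold from any accumulator ending in `cur` appends exactly the 2-D walk
theorem pv_fold_eq_walk2 (dims : Int × Int) (bps : List String) :
    ∀ (acc : List (Int × Int)) (cur : Int × Int),
      PySem.List.pyGet? acc (-1) = some cur →
      bps.foldl (fun pairPositions pair =>
        pairPositions ++
          [pvStep2 dims ((PySem.List.pyGet? pairPositions (-1)).getD (0, 0)) pair]) acc
      = acc ++ pvWalk2 dims cur bps := by
  induction bps with
  | nil => intro acc cur _; simp [pvWalk2]
  | cons p ps ih =>
    intro acc cur hlast
    simp only [List.foldl_cons, hlast, Option.getD_some, pvWalk2]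
    rw [ih (acc ++ [pvStep2 dims cur p]) (pvStep2 dims cur p)
          (PySem.List.pyGet?_neg_one_append_singleton _ _)]
    simp [List.append_assoc]

-- the 2-D walk is the zip of the two 1-D walks over the mapped delta lists
theorem pv_walk2_eq_zip (dims : Int × Int) (bps : List String) :
    ∀ (cur : Int × Int),
      pvWalk2 dims cur bps
      = (pvWalk1d dims.1 cur.1 (bps.map (fun p => if PySem.Str.pyGet? p (-1) == some '0' then (-1 : Int) else 1))).zip
        (pvWalk1d dims.2 cur.2 (bps.map (fun p => if PySem.Str.pyGet? p 0 == some '0' then (-1 : Int) else 1))) := by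
  induction bps with
  | nil => intro cur; simp [pvWalk2, pvWalk1d]
  | cons p ps ih =>
    intro cur
    simp only [pvWalk2, List.map_cons, pvWalk1d, List.zip_cons_cons]
    exact congrArg _ (ih _)

-- ===== VERDICT =====
theorem gen_xy_positions_spec : Claim_equal_gen_xy_positions := by
  intro bps dims _ _
  show gen_xy_positions bps dims = gen_xy_positions_alt bps dims
  have hA : gen_xy_positions bps dims
      = [(PySem.Int.floordiv dims.1 2, PySem.Int.floordiv dims.2 2)]
        ++ pvWalk2 dims (PySem.Int.floordiv dims.1 2, PySem.Int.floordiv dims.2 2) bps :=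
    pv_fold_eq_walk2 dims bps _ _ rfl
  rw [hA, pv_walk2_eq_zip]
  rfl
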